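-- pv_equiv track=rewrite | github.com/EA4RCH/adif2json | src/adif2json/parser.py | _update_position
-- ===== SOURCE A (Python) =====
-- from typing import Any, Iterator, List, Optional, Tuple
--
-- def _update_position(s: str, line: int, column: int) -> Tuple[int, int]:
--     if s == "":
--         return line, column
--     else:
--         if line == 0:
--             line = 1
--         if column == 0:
--             column = 1
--     while len(s) > 0:
--         if s[0] == "\n":
--             line += 1
--             column = 0
--         else:
--             column += 1
--         s = s[1:]
--     return line, column
-- ===== SOURCE B (Python) =====
-- def _update_position(s, line, column):
--     if not s:
--         return line, column
--     if line == 0: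
--         line = 1
--     if column == 0:
--         column = 1
--     # single reverse pass: count newlines; column = chars after the last newline
--     newlines = 0
--     tail = 0
--     for ch in reversed(s):
--         if ch == "\n":
--             newlines += 1
--         elif newlines == 0:
--             tail += 1
--     if newlines == 0:
--         return line, column + len(s)
--     return line + newlines, tail
-- ===== Notes on version B (the rewrite author's own statement) =====
-- stated objective: faster
-- what changed: Replaces A's per-character while loop that re-slices the string (s = s[1:]) and threads (line, column) through every step by a single reverse pass that counts newlines and the characters after the last newline, combining them arithmetically at the end.
import Mathlib
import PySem

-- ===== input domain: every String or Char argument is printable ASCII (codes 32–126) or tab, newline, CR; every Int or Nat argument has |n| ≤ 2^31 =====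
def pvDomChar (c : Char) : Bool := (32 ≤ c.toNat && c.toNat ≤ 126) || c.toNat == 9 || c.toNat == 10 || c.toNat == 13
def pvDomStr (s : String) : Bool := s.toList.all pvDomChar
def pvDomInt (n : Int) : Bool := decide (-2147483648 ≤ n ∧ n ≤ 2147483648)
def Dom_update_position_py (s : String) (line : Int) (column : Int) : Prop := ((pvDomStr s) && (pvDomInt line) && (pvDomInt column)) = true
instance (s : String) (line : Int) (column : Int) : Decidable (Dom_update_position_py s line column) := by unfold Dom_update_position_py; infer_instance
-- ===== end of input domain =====

-- B replaces A's per-character slice-and-step loop by one reverse pass (count newlines,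
-- chars after the last newline), combined arithmetically at the end: faster.

-- ===== PORT A =====
-- the 'while len(s) > 0' loop: consume the first character, update (line, column)
def pvALoop : List Char → Int → Int → Int × Int
  | [], line, column => (line, column)
  | c :: rest, line, column =>
    if c = '\n' then pvALoop rest (line + 1) 0
    else pvALoop rest line (column + 1)

def update_position_py (s : String) (line : Int) (column : Int) : Int × Int :=
  if s = "" then (line, column)
  else
    let line := if line = 0 then 1 else line
    let column := if column = 0 then 1 else column
    pvALoop s.toList line column

-- ===== PORT B =====
-- one pass over reversed(s): count newlines; .2 counts chars until the first newline seen
def pvBStep (st : Int × Int) (c : Char) : Int × Int :=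
  if c = '\n' then (st.1 + 1, st.2)
  else if st.1 = 0 then (st.1, st.2 + 1)
  else st

def update_position_py_alt (s : String) (line : Int) (column : Int) : Int × Int :=
  if s = "" then (line, column)
  else
    let line := if line = 0 then 1 else line
    let column := if column = 0 then 1 else column
    let st := s.toList.reverse.foldl pvBStep (0, 0)
    if st.1 = 0 then (line, column + (s.toList.length : Int))
    else (line + st.1, st.2)

-- ===== PRECONDITION & SPEC =====
def Spec_update_position_py (s : String) (line : Int) (column : Int) (out : Int × Int) : Prop := out = update_position_py_alt s line column
instance (s : String) (line : Int) (column : Int) (out : Int × Int) : Decidable (Spec_update_position_py s line column out) := by unfold Spec_update_position_py; infer_instance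

-- ===== CLAIM (what is proved, stated in full; the proofs are below) =====
def Claim_equal_update_position_py : Prop := ∀ (s : String) (line : Int) (column : Int), Dom_update_position_py s line column → Spec_update_position_py s line column (update_position_py s line column)

-- ===== LEMMAS AND PROOFS =====

-- common closed form of both loops
def pvSpec (l : List Char) (line column : Int) : Int × Int :=
  if l.count '\n' = 0 then (line, column + (l.length : Int))
  else (line + (l.count '\n' : Int), ((l.reverse.takeWhile (fun c => c ≠ '\n')).length : Int))

theorem pv_tw_all (xs : List Char) (h : xs.count '\n' = 0) :
    xs.takeWhile (fun c => c ≠ '\n') = xs := by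
  apply List.takeWhile_eq_self_iff.mpr
  intro x hx
  simp only [decide_eq_true_eq]
  intro he
  subst he
  have := List.count_pos_iff.mpr hx
  omega

theorem pv_tw_append (xs : List Char) (c : Char) (hmem : '\n' ∈ xs) :
    (xs ++ [c]).takeWhile (fun c => c ≠ '\n') = xs.takeWhile (fun c => c ≠ '\n') := by
  rw [List.takeWhile_append]
  split
  · next h =>
    exfalso
    have heq : xs.takeWhile (fun c => c ≠ '\n') = xs :=
      (List.takeWhile_prefix _).eq_of_length h
    have := List.mem_takeWhile_imp (heq ▸ hmem)
    simp at this
  · rfl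

theorem pv_mem_of_count (xs : List Char) (h0 : ¬ xs.count '\n' = 0) : '\n' ∈ xs :=
  List.count_pos_iff.mp (by omega)

theorem pvALoop_eq_spec (l : List Char) : ∀ (line column : Int),
    pvALoop l line column = pvSpec l line column := by
  induction l with
  | nil => intro line column; simp [pvALoop, pvSpec]
  | cons c rest ih =>
    intro line column
    by_cases hc : c = '\n'
    · subst hc
      rw [pvALoop, if_pos rfl, ih]
      unfold pvSpec
      by_cases h0 : rest.count '\n' = 0
      · have hr : rest.reverse.count '\n' = 0 := by simpa [List.count_reverse] using h0
        have htw : (('\n' :: rest).reverse).takeWhile (fun c => c ≠ '\n') = rest.reverse := by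
          rw [List.reverse_cons, List.takeWhile_append, if_pos (by rw [pv_tw_all _ hr])]
          simp
        rw [if_pos h0, if_neg (by simp : ¬ ('\n' :: rest).count '\n' = 0), htw]
        simp [Prod.ext_iff]
        omega
      · have hmem : '\n' ∈ rest.reverse := by
          rw [List.mem_reverse]; exact pv_mem_of_count rest h0
        rw [if_neg h0]
        simp only [List.count_cons, List.reverse_cons, pv_tw_append _ _ hmem]
        simp [h0, Prod.ext_iff]
        omega
    · rw [pvALoop, if_neg hc, ih]
      unfold pvSpec
      have hcnt : (c :: rest).count '\n' = rest.count '\n' := by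
        simp [hc]
      by_cases h0 : rest.count '\n' = 0
      · simp [hcnt, h0, Prod.ext_iff]
        omega
      · have hmem : '\n' ∈ rest.reverse := by
          rw [List.mem_reverse]; exact pv_mem_of_count rest h0
        rw [if_neg h0, hcnt, if_neg h0, List.reverse_cons, pv_tw_append _ _ hmem]

theorem pvBfold_pos (m : List Char) : ∀ (nl tl : Int), 0 < nl →
    m.foldl pvBStep (nl, tl) = (nl + (m.count '\n' : Int), tl) := by
  induction m with
  | nil => intro nl tl _; simp
  | cons c rest ih =>
    intro nl tl h
    by_cases hc : c = '\n'
    · subst hc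
      have hstep : pvBStep (nl, tl) '\n' = (nl + 1, tl) := by simp [pvBStep]
      rw [List.foldl_cons, hstep, ih (nl + 1) tl (by omega)]
      simp [Prod.ext_iff]
      omega
    · have hstep : pvBStep (nl, tl) c = (nl, tl) := by
        rw [pvBStep]; simp only [if_neg hc]; rw [if_neg (by omega : ¬ nl = 0)]
      rw [List.foldl_cons, hstep, ih nl tl h]
      simp [hc]

theorem pvBfold_zero (m : List Char) : ∀ (tl : Int),
    m.foldl pvBStep (0, tl) =
      if m.count '\n' = 0 then ((0 : Int), tl + (m.length : Int))
      else ((m.count '\n' : Int), tl + ((m.takeWhile (fun c => c ≠ '\n')).length : Int)) := by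
  induction m with
  | nil => intro tl; simp
  | cons c rest ih =>
    intro tl
    by_cases hc : c = '\n'
    · subst hc
      have hstep : pvBStep (0, tl) '\n' = (1, tl) := by simp [pvBStep]
      rw [List.foldl_cons, hstep, pvBfold_pos rest 1 tl (by omega)]
      have : ¬ ('\n' :: rest).count '\n' = 0 := by simp
      rw [if_neg this]
      simp [Prod.ext_iff]
      omega
    · have hstep : pvBStep (0, tl) c = (0, tl + 1) := by
        rw [pvBStep]; simp [hc]
      rw [List.foldl_cons, hstep, ih (tl + 1)]
      have hcnt : (c :: rest).count '\n' = rest.count '\n' := by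
        simp [hc]
      by_cases h0 : rest.count '\n' = 0
      · simp [hcnt, h0, Prod.ext_iff]
        omega
      · rw [if_neg h0, hcnt, if_neg h0,
            List.takeWhile_cons_of_pos (by simpa using hc)]
        simp [Prod.ext_iff]
        omega

-- ===== VERDICT (by name: the statement is the Claim_ definition above) =====
theorem update_position_py_spec : Claim_equal_update_position_py := by
  intro s line column _
  unfold Spec_update_position_py update_position_py update_position_py_alt
  by_cases he : s = ""
  · simp [he]
  · simp only [if_neg he]
    rw [pvALoop_eq_spec, pvBfold_zero]
    unfold pvSpec
    by_cases h0 : s.toList.count '\n' = 0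
    · have hr : s.toList.reverse.count '\n' = 0 := by simpa [List.count_reverse] using h0
      simp [h0, hr]
    · have hr : ¬ s.toList.reverse.count '\n' = 0 := by simpa [List.count_reverse] using h0
      rw [if_neg h0, if_neg hr]
      have : ¬ (s.toList.reverse.count '\n' : Int) = 0 := by
        simpa using hr
      rw [if_neg this]
      simp [List.count_reverse]
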